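-- pv_equiv track=rewrite | github.com/michele98/ball_tracking_padel | trajectories/filtering.py | find_prev_node
-- ===== SOURCE A (Python) =====
-- def find_prev_node(frame_idx, path_mapping):
--     node = path_mapping[frame_idx]
--     prev_node = None
--     prev_idx = None
--     for f, n in path_mapping.items():
--         if n!=node:
--             prev_node = n
--             prev_idx = f
--             continue
--         if f >= frame_idx:
--             break
--     return prev_idx, prev_node
-- ===== SOURCE B (Python) =====
-- def find_prev_node(frame_idx, path_mapping):
--     items = list(path_mapping.items())
--     node = path_mapping[frame_idx]
--     stop = len(items)
--     for i, (f, n) in enumerate(items):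
--         if n == node and f >= frame_idx:
--             stop = i
--             break
--     for j in range(stop - 1, -1, -1):
--         f, n = items[j]
--         if n != node:
--             return f, n
--     return None, None
-- ===== Notes on version B (the rewrite author's own statement) =====
-- stated objective: alternative
-- what changed: Replaces A's single forward pass with a last-differing-item accumulator and early break by a locate-then-reverse-scan: find the break index first, then scan backwards from it for the first item with a different value.
import Mathlib
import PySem

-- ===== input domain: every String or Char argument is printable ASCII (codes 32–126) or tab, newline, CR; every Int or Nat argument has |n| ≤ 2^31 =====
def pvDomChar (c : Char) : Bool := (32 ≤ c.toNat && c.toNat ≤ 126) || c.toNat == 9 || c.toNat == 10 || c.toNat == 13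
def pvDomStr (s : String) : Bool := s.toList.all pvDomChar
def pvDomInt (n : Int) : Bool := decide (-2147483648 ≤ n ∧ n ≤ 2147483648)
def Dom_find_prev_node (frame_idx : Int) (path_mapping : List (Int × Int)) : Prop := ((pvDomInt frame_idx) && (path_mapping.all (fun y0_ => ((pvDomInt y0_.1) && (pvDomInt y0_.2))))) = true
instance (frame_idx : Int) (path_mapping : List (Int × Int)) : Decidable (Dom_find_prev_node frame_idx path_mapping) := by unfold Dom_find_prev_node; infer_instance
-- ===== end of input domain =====

-- B replaces A's forward accumulator-with-break pass by a locate-then-reverse-scan decomposition (alternative, same cost).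


-- ===== PORT A =====
-- the for-loop: acc = (prev_idx, prev_node)
def findPrevLoopA (frame_idx node : Int) : List (Int × Int) → Option Int × Option Int → Option Int × Option Int
  | [], acc => acc
  | (f, n) :: rest, acc =>
    if n ≠ node then findPrevLoopA frame_idx node rest (some f, some n)
    else if f ≥ frame_idx then acc
    else findPrevLoopA frame_idx node rest acc

def find_prev_node (frame_idx : Int) (path_mapping : List (Int × Int)) : Option Int × Option Int :=
  -- node = path_mapping[frame_idx]; KeyError is excluded by Pre_, so getD 0 is exact there
  let node := ((PySem.Dict.mk path_mapping).get? frame_idx).getD 0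
  findPrevLoopA frame_idx node path_mapping (none, none)

-- ===== PORT B =====
-- first pass: index of the first item with n == node and f >= frame_idx, defaulting to the length
def findStopB (frame_idx node : Int) : List (Int × Int) → Nat
  | [] => 0
  | (f, n) :: rest => if n = node ∧ f ≥ frame_idx then 0 else findStopB frame_idx node rest + 1

-- second pass: scan items[stop-1 .. 0] for the first item whose value differs from node
def revFindB (node : Int) : List (Int × Int) → Option Int × Option Int
  | [] => (none, none)
  | (f, n) :: rest => if n ≠ node then (some f, some n) else revFindB node rest

def find_prev_node_alt (frame_idx : Int) (path_mapping : List (Int × Int)) : Option Int × Option Int :=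
  let node := ((PySem.Dict.mk path_mapping).get? frame_idx).getD 0
  let stop := findStopB frame_idx node path_mapping
  revFindB node ((path_mapping.take stop).reverse)

-- ===== PRECONDITION & SPEC =====
-- Pre_ excludes inputs where A raises KeyError (frame_idx not a key) and lists with duplicate keys,
-- which cannot arise from a Python dict (the assoc-list representation of duplicates is accidental).
def Pre_find_prev_node (frame_idx : Int) (path_mapping : List (Int × Int)) : Prop :=
  frame_idx ∈ path_mapping.map Prod.fst ∧ (path_mapping.map Prod.fst).Nodup
instance (frame_idx : Int) (path_mapping : List (Int × Int)) : Decidable (Pre_find_prev_node frame_idx path_mapping) := by unfold Pre_find_prev_node; infer_instance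
def pvWitness_find_prev_node : Int × (List (Int × Int)) := (2, [(0, 5), (1, 7), (2, 7), (3, 5)])

def Spec_find_prev_node (frame_idx : Int) (path_mapping : List (Int × Int)) (out : Option Int × Option Int) : Prop := out = find_prev_node_alt frame_idx path_mapping
instance (frame_idx : Int) (path_mapping : List (Int × Int)) (out : Option Int × Option Int) : Decidable (Spec_find_prev_node frame_idx path_mapping out) := by unfold Spec_find_prev_node; infer_instance

-- ===== CLAIM (what is proved, stated in full; the proofs are below) =====
def Claim_equal_find_prev_node : Prop := ∀ (frame_idx : Int) (path_mapping : List (Int × Int)), Dom_find_prev_node frame_idx path_mapping → Pre_find_prev_node frame_idx path_mapping → Spec_find_prev_node frame_idx path_mapping (find_prev_node frame_idx path_mapping)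

-- ===== LEMMAS AND PROOFS =====

theorem revFindB_append (node : Int) (l1 l2 : List (Int × Int)) :
    revFindB node (l1 ++ l2) =
      if revFindB node l1 = (none, none) then revFindB node l2 else revFindB node l1 := by
  induction l1 with
  | nil => simp [revFindB]
  | cons a rest ih =>
    obtain ⟨f, n⟩ := a
    by_cases h : n = node
    · simpa [revFindB, h] using ih
    · simp [revFindB, h]

theorem findPrevLoopA_eq (frame_idx node : Int) (xs : List (Int × Int)) (acc : Option Int × Option Int) :
    findPrevLoopA frame_idx node xs acc =
      (if revFindB node ((xs.take (findStopB frame_idx node xs)).reverse) = (none, none)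
       then acc
       else revFindB node ((xs.take (findStopB frame_idx node xs)).reverse)) := by
  induction xs generalizing acc with
  | nil => simp [findPrevLoopA, findStopB, revFindB]
  | cons a rest ih =>
    obtain ⟨f, n⟩ := a
    by_cases hn : n = node
    · by_cases hf : f ≥ frame_idx
      · simp [findPrevLoopA, findStopB, hn, hf, revFindB]
      · rw [show findPrevLoopA frame_idx node ((f, n) :: rest) acc
              = findPrevLoopA frame_idx node rest acc by simp [findPrevLoopA, hn, hf]]
        rw [ih]
        have hstop : findStopB frame_idx node ((f, n) :: rest)
            = findStopB frame_idx node rest + 1 := by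
          simp [findStopB, hn, hf]
        rw [hstop]
        simp only [List.take_succ_cons, List.reverse_cons, revFindB_append]
        have hsingle : revFindB node [(f, n)] = (none, none) := by simp [revFindB, hn]
        rw [hsingle]
        split_ifs with h1 <;> simp_all
    · rw [show findPrevLoopA frame_idx node ((f, n) :: rest) acc
            = findPrevLoopA frame_idx node rest (some f, some n) by simp [findPrevLoopA, hn]]
      rw [ih]
      have hstop : findStopB frame_idx node ((f, n) :: rest)
          = findStopB frame_idx node rest + 1 := by simp [findStopB, hn]
      rw [hstop]
      simp only [List.take_succ_cons, List.reverse_cons, revFindB_append]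
      have hsingle : revFindB node [(f, n)] = (some f, some n) := by simp [revFindB, hn]
      rw [hsingle]
      split_ifs with h1 <;> simp_all

-- ===== VERDICT (by name: the statement is the Claim_ definition above) =====
theorem find_prev_node_spec : Claim_equal_find_prev_node := by
  intro frame_idx path_mapping _ _
  show _ = _
  unfold find_prev_node find_prev_node_alt
  rw [findPrevLoopA_eq]
  split_ifs with h <;> simp [h]
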